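-- pv_equiv track=rewrite | github.com/Vejtah/scrabblebot | code/virtual/alg.py | remove_impossible
-- ===== SOURCE A (Python) =====
-- def remove_impossible(board: dict) -> dict:
--     """
--     Filter board positions to only those adjacent to an existing letter.
--     This reduces the search space by focusing on "active" areas.
--     """
--     rows, cols = 10, 15
--     filtered = {}
--     for y in range(rows):
--         for x in range(cols):
--             # Check the 3x3 neighborhood.
--             adjacent = False
--             for dy in (-1, 0, 1):
--                 for dx in (-1, 0, 1):
--                     nx, ny = x + dx, y + dy
--                     if 0 <= nx < cols and 0 <= ny < rows:
--                         if board.get((nx, ny)) is not None: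
--                             adjacent = True
--             if adjacent:
--                 filtered[(x, y)] = board.get((x, y))
--     return filtered
-- ===== SOURCE B (Python) =====
-- def remove_impossible(board: dict) -> dict:
--     """
--     Filter board positions to only those adjacent to an existing letter.
--     Sparse pass: mark the 3x3 neighborhood of every in-grid letter, then
--     emit the marked cells in row-major order.
--     """
--     rows, cols = 10, 15
--     active = set()
--     for key, val in board.items():
--         if val is not None and len(key) == 2:
--             x, y = key
--             if 0 <= x < cols and 0 <= y < rows:
--                 for ny in (y - 1, y, y + 1):
--                     for nx in (x - 1, x, x + 1):
--                         if 0 <= nx < cols and 0 <= ny < rows: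
--                             active.add((nx, ny))
--     return {(x, y): board.get((x, y))
--             for y in range(rows) for x in range(cols) if (x, y) in active}
-- ===== Notes on version B (the rewrite author's own statement) =====
-- stated objective: alternative
-- what changed: Replaces the dense per-cell 3x3 neighborhood probe (1350 dict lookups) by a sparse pass that marks the 3x3 neighborhood of each in-grid letter into a set and then emits marked cells row-major.
import Mathlib
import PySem

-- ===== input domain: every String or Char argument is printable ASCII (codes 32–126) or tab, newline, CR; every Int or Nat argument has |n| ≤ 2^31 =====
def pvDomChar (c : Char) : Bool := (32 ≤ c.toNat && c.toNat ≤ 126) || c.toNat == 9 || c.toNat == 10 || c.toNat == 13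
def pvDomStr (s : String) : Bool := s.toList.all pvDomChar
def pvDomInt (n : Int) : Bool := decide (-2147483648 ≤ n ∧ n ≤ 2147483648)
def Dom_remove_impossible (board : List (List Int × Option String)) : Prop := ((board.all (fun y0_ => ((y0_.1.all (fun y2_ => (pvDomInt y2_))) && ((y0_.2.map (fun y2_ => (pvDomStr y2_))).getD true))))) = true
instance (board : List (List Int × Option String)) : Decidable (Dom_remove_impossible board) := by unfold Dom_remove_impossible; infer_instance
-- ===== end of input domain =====

-- B replaces A's dense per-cell 3x3 neighborhood probe by a sparse pass that marks the
-- neighborhoods of in-grid letters into a set and then emits the marked cells row-major (alternative decomposition).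


-- ===== PORT A =====
def remove_impossible (board : List (List Int × Option String)) : List (List Int × Option String) :=
  let rows : Int := 10
  let cols : Int := 15
  let bd := PySem.Dict.mk board
  let filtered :=
    (PySem.List.pyRange 0 rows 1).foldl (fun filtered y =>
      (PySem.List.pyRange 0 cols 1).foldl (fun filtered x =>
        let adjacent :=
          ([-1, 0, 1] : List Int).foldl (fun adjacent dy =>
            ([-1, 0, 1] : List Int).foldl (fun adjacent dx =>
              let nx := x + dx
              let ny := y + dy
              if 0 ≤ nx ∧ nx < cols ∧ 0 ≤ ny ∧ ny < rows then
                if bd.getD [nx, ny] none ≠ none then true else adjacent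
              else adjacent) adjacent) false
        if adjacent then filtered.insert [x, y] (bd.getD [x, y] none) else filtered)
        filtered) PySem.Dict.empty
  filtered.items

-- ===== PORT B =====
def remove_impossible_alt (board : List (List Int × Option String)) : List (List Int × Option String) :=
  let rows : Int := 10
  let cols : Int := 15
  let active : PySem.Set (Int × Int) :=
    board.foldl (fun s kv =>
      match kv with
      | ([x, y], some _) =>
        if 0 ≤ x ∧ x < cols ∧ 0 ≤ y ∧ y < rows then
          ([y - 1, y, y + 1] : List Int).foldl (fun s ny =>
            ([x - 1, x, x + 1] : List Int).foldl (fun s nx =>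
              if 0 ≤ nx ∧ nx < cols ∧ 0 ≤ ny ∧ ny < rows then PySem.Set.add s (nx, ny)
              else s) s) s
        else s
      | _ => s) PySem.Set.empty
  (PySem.List.pyRange 0 rows 1).flatMap (fun y =>
    (PySem.List.pyRange 0 cols 1).filterMap (fun x =>
      if (x, y) ∈ active then
        some ([x, y], PySem.Dict.getD (PySem.Dict.mk board) [x, y] none)
      else none))

-- ===== PRECONDITION & SPEC =====
-- Pre_ excludes association lists with duplicate keys: a Python dict (the input of both A and B)
-- can never contain a duplicate key, so such lists represent no Python input at all.
def Pre_remove_impossible (board : List (List Int × Option String)) : Prop :=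
  (board.map Prod.fst).Nodup
instance (board : List (List Int × Option String)) : Decidable (Pre_remove_impossible board) := by
  unfold Pre_remove_impossible; infer_instance

def pvWitness_remove_impossible : (List (List Int × Option String)) :=
  [([2, 3], some "a"), ([5, 5], none), ([99, 1], some "q")]

def Spec_remove_impossible (board : List (List Int × Option String)) (out : List (List Int × Option String)) : Prop := out = remove_impossible_alt board
instance (board : List (List Int × Option String)) (out : List (List Int × Option String)) : Decidable (Spec_remove_impossible board out) := by unfold Spec_remove_impossible; infer_instance

-- ===== CLAIM (what is proved, stated in full; the proofs are below) =====
def Claim_equal_remove_impossible : Prop := ∀ (board : List (List Int × Option String)), Dom_remove_impossible board → Pre_remove_impossible board → Spec_remove_impossible board (remove_impossible board)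

-- ===== LEMMAS AND PROOFS =====

-- the lookup both ports perform: board.get(k) of the Python dict
abbrev pvLk (board : List (List Int × Option String)) (k : List Int) : Option String :=
  PySem.Dict.getD (PySem.Dict.mk board) k none

abbrev pvGrid (x y : Int) : Prop := 0 ≤ x ∧ x < 15 ∧ 0 ≤ y ∧ y < 10

-- A's adjacency condition at a cell, as a proposition
abbrev pvAdjA (board : List (List Int × Option String)) (x y : Int) : Prop :=
  ∃ dy ∈ ([-1, 0, 1] : List Int), ∃ dx ∈ ([-1, 0, 1] : List Int),
    pvGrid (x + dx) (y + dy) ∧ pvLk board [x + dx, y + dy] ≠ none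

-- what one board entry contributes to B's active set
def pvMarks (kv : List Int × Option String) (c : Int × Int) : Prop :=
  kv.2 ≠ none ∧ ∃ lx ly, kv.1 = [lx, ly] ∧ pvGrid lx ly ∧
    ∃ ny ∈ ([ly - 1, ly, ly + 1] : List Int), ∃ nx ∈ ([lx - 1, lx, lx + 1] : List Int),
      pvGrid nx ny ∧ c = (nx, ny)

-- the row-major grid
def pvCells : List (Int × Int) :=
  (PySem.List.pyRange 0 10 1).flatMap (fun y => (PySem.List.pyRange 0 15 1).map (fun x => (x, y)))

-- generic: membership after a foldl whose step is characterized pointwise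
theorem pv_mem_foldl {α σ γ : Type} (step : σ → α → σ) (P : α → γ → Prop) (c : γ)
    (Mem : σ → γ → Prop)
    (h : ∀ s a, Mem (step s a) c ↔ P a c ∨ Mem s c) :
    ∀ (l : List α) (s0 : σ), Mem (l.foldl step s0) c ↔ (∃ a ∈ l, P a c) ∨ Mem s0 c := by
  intro l
  induction l with
  | nil => simp
  | cons a t ih =>
    intro s0
    simp only [List.foldl_cons, ih, h, List.mem_cons]
    constructor
    · rintro (⟨b, hb, hP⟩ | hP | hs)
      exacts [Or.inl ⟨b, Or.inr hb, hP⟩, Or.inl ⟨a, Or.inl rfl, hP⟩, Or.inr hs]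
    · rintro (⟨b, rfl | hb, hP⟩ | hs)
      exacts [Or.inr (Or.inl hP), Or.inl ⟨b, hb, hP⟩, Or.inr (Or.inr hs)]

-- bool foldl shapes used by A's adjacency loop
theorem pv_foldl_or {α : Type} (q : α → Bool) :
    ∀ (l : List α) (acc : Bool), l.foldl (fun a e => a || q e) acc = (acc || l.any q) := by
  intro l
  induction l with
  | nil => simp
  | cons a t ih => intro acc; simp [ih, Bool.or_assoc]

theorem pv_foldl_ite_true {α : Type} (p : α → Prop) [DecidablePred p]
    (l : List α) (acc : Bool) :
    l.foldl (fun a e => if p e then true else a) acc = (acc || l.any (fun e => decide (p e))) := by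
  have h : (fun (a : Bool) (e : α) => if p e then true else a) = fun a e => a || decide (p e) := by
    funext a e; by_cases h : p e <;> simp [h]
  rw [h, pv_foldl_or]

-- A's adjacency loop computes decide (pvAdjA board x y)
theorem pv_adjA_eq (board : List (List Int × Option String)) (x y : Int) :
    (([-1, 0, 1] : List Int).foldl (fun adjacent dy =>
      ([-1, 0, 1] : List Int).foldl (fun adjacent dx =>
        if 0 ≤ x + dx ∧ x + dx < 15 ∧ 0 ≤ y + dy ∧ y + dy < 10 then
          if PySem.Dict.getD (PySem.Dict.mk board) [x + dx, y + dy] none ≠ none then true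
          else adjacent
        else adjacent) adjacent) false)
    = decide (pvAdjA board x y) := by
  have hinner : ∀ (dy : Int) (a : Bool),
      ([-1, 0, 1] : List Int).foldl (fun adjacent dx =>
        if 0 ≤ x + dx ∧ x + dx < 15 ∧ 0 ≤ y + dy ∧ y + dy < 10 then
          if PySem.Dict.getD (PySem.Dict.mk board) [x + dx, y + dy] none ≠ none then true
          else adjacent
        else adjacent) a
      = (a || ([-1, 0, 1] : List Int).any (fun dx =>
          decide ((0 ≤ x + dx ∧ x + dx < 15 ∧ 0 ≤ y + dy ∧ y + dy < 10) ∧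
            PySem.Dict.getD (PySem.Dict.mk board) [x + dx, y + dy] none ≠ none))) := by
    intro dy a
    have hb : (fun (adjacent : Bool) (dx : Int) =>
        if 0 ≤ x + dx ∧ x + dx < 15 ∧ 0 ≤ y + dy ∧ y + dy < 10 then
          if PySem.Dict.getD (PySem.Dict.mk board) [x + dx, y + dy] none ≠ none then true
          else adjacent
        else adjacent)
        = fun adjacent dx =>
          if (0 ≤ x + dx ∧ x + dx < 15 ∧ 0 ≤ y + dy ∧ y + dy < 10) ∧
              PySem.Dict.getD (PySem.Dict.mk board) [x + dx, y + dy] none ≠ none then true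
          else adjacent := by
      funext a' dx
      by_cases h1 : 0 ≤ x + dx ∧ x + dx < 15 ∧ 0 ≤ y + dy ∧ y + dy < 10 <;>
        by_cases h2 : PySem.Dict.getD (PySem.Dict.mk board) [x + dx, y + dy] none ≠ none <;>
        simp [h1, h2]
    rw [hb, pv_foldl_ite_true]
  have houter : (fun (adjacent : Bool) (dy : Int) =>
      ([-1, 0, 1] : List Int).foldl (fun adjacent dx =>
        if 0 ≤ x + dx ∧ x + dx < 15 ∧ 0 ≤ y + dy ∧ y + dy < 10 then
          if PySem.Dict.getD (PySem.Dict.mk board) [x + dx, y + dy] none ≠ none then true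
          else adjacent
        else adjacent) adjacent)
      = fun adjacent dy => adjacent || ([-1, 0, 1] : List Int).any (fun dx =>
          decide ((0 ≤ x + dx ∧ x + dx < 15 ∧ 0 ≤ y + dy ∧ y + dy < 10) ∧
            PySem.Dict.getD (PySem.Dict.mk board) [x + dx, y + dy] none ≠ none)) := by
    funext a dy; exact hinner dy a
  rw [houter, pv_foldl_or, Bool.eq_iff_iff]
  simp only [Bool.false_or, List.any_eq_true, decide_eq_true_eq, pvAdjA, pvGrid, pvLk]

-- membership in the neighborhood-marking loop of one letter
theorem pv_mem_mark (c : Int × Int) (x y : Int) (s : PySem.Set (Int × Int)) :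
    c ∈ ([y - 1, y, y + 1] : List Int).foldl (fun s ny =>
          ([x - 1, x, x + 1] : List Int).foldl (fun s nx =>
            if 0 ≤ nx ∧ nx < 15 ∧ 0 ≤ ny ∧ ny < 10 then PySem.Set.add s (nx, ny) else s) s) s
    ↔ (∃ ny ∈ ([y - 1, y, y + 1] : List Int), ∃ nx ∈ ([x - 1, x, x + 1] : List Int),
        (0 ≤ nx ∧ nx < 15 ∧ 0 ≤ ny ∧ ny < 10) ∧ c = (nx, ny)) ∨ c ∈ s := by
  have hinner : ∀ (ny : Int) (s : PySem.Set (Int × Int)),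
      c ∈ ([x - 1, x, x + 1] : List Int).foldl (fun s nx =>
            if 0 ≤ nx ∧ nx < 15 ∧ 0 ≤ ny ∧ ny < 10 then PySem.Set.add s (nx, ny) else s) s
      ↔ (∃ nx ∈ ([x - 1, x, x + 1] : List Int),
          (0 ≤ nx ∧ nx < 15 ∧ 0 ≤ ny ∧ ny < 10) ∧ c = (nx, ny)) ∨ c ∈ s := by
    intro ny
    refine pv_mem_foldl
      (fun (s : PySem.Set (Int × Int)) nx =>
        if 0 ≤ nx ∧ nx < 15 ∧ 0 ≤ ny ∧ ny < 10 then PySem.Set.add s (nx, ny) else s)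
      (fun nx c' => (0 ≤ nx ∧ nx < 15 ∧ 0 ≤ ny ∧ ny < 10) ∧ c' = (nx, ny)) c
      (fun (s : PySem.Set (Int × Int)) c' => c' ∈ s) ?_ _
    intro s nx
    show c ∈ (if 0 ≤ nx ∧ nx < 15 ∧ 0 ≤ ny ∧ ny < 10 then PySem.Set.add s (nx, ny) else s) ↔
      ((0 ≤ nx ∧ nx < 15 ∧ 0 ≤ ny ∧ ny < 10) ∧ c = (nx, ny)) ∨ c ∈ s
    by_cases hg : 0 ≤ nx ∧ nx < 15 ∧ 0 ≤ ny ∧ ny < 10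
    · rw [if_pos hg, PySem.Set.mem_add]
      constructor
      · rintro (h | h)
        exacts [Or.inr h, Or.inl ⟨hg, h⟩]
      · rintro (⟨-, h⟩ | h)
        exacts [Or.inr h, Or.inl h]
    · simp [hg]
  refine pv_mem_foldl
    (fun (s : PySem.Set (Int × Int)) ny =>
      ([x - 1, x, x + 1] : List Int).foldl (fun s nx =>
        if 0 ≤ nx ∧ nx < 15 ∧ 0 ≤ ny ∧ ny < 10 then PySem.Set.add s (nx, ny) else s) s)
    (fun ny c' => ∃ nx ∈ ([x - 1, x, x + 1] : List Int),
      (0 ≤ nx ∧ nx < 15 ∧ 0 ≤ ny ∧ ny < 10) ∧ c' = (nx, ny)) c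
    (fun (s : PySem.Set (Int × Int)) c' => c' ∈ s) ?_ _ _
  intro s ny
  exact hinner ny s

-- membership in B's active set
theorem pv_mem_active (board : List (List Int × Option String)) (c : Int × Int) :
    c ∈ board.foldl (fun s kv =>
      match kv with
      | ([x, y], some _) =>
        if 0 ≤ x ∧ x < 15 ∧ 0 ≤ y ∧ y < 10 then
          ([y - 1, y, y + 1] : List Int).foldl (fun s ny =>
            ([x - 1, x, x + 1] : List Int).foldl (fun s nx =>
              if 0 ≤ nx ∧ nx < 15 ∧ 0 ≤ ny ∧ ny < 10 then PySem.Set.add s (nx, ny)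
              else s) s) s
        else s
      | _ => s) PySem.Set.empty
    ↔ ∃ kv ∈ board, pvMarks kv c := by
  have h := pv_mem_foldl (γ := Int × Int) (fun s kv =>
      match kv with
      | ([x, y], some _) =>
        if 0 ≤ x ∧ x < 15 ∧ 0 ≤ y ∧ y < 10 then
          ([y - 1, y, y + 1] : List Int).foldl (fun s ny =>
            ([x - 1, x, x + 1] : List Int).foldl (fun s nx =>
              if 0 ≤ nx ∧ nx < 15 ∧ 0 ≤ ny ∧ ny < 10 then PySem.Set.add s (nx, ny)
              else s) s) s
        else s
      | _ => s) pvMarks c (fun s c' => c' ∈ s) ?_ board PySem.Set.empty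
  · rw [h]
    simp [PySem.Set.empty]
  · intro s kv
    obtain ⟨k, v⟩ := kv
    rcases k with _ | ⟨a, k⟩
    · cases v <;> simp [pvMarks]
    · rcases k with _ | ⟨b, k⟩
      · cases v <;> simp [pvMarks]
      · rcases k with _ | ⟨c', k⟩
        · cases v with
          | none => simp [pvMarks]
          | some w =>
            by_cases hg : 0 ≤ a ∧ a < 15 ∧ 0 ≤ b ∧ b < 10
            · show c ∈ (if 0 ≤ a ∧ a < 15 ∧ 0 ≤ b ∧ b < 10 then _ else s) ↔ _
              rw [if_pos hg, pv_mem_mark]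
              simp only [pvMarks, pvGrid]
              constructor
              · rintro (⟨ny, hny, nx, hnx, hgn, rfl⟩ | hs)
                · exact Or.inl ⟨by simp, a, b, rfl, hg, ny, hny, nx, hnx, hgn, rfl⟩
                · exact Or.inr hs
              · rintro (⟨-, lx, ly, hk, hgl, ny, hny, nx, hnx, hgn, rfl⟩ | hs)
                · obtain ⟨rfl, rfl⟩ : a = lx ∧ b = ly := by simpa using hk
                  exact Or.inl ⟨ny, hny, nx, hnx, hgn, rfl⟩
                · exact Or.inr hs
            · show c ∈ (if 0 ≤ a ∧ a < 15 ∧ 0 ≤ b ∧ b < 10 then _ else s) ↔ _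
              rw [if_neg hg]
              simp only [pvMarks, pvGrid]
              constructor
              · exact Or.inr
              · rintro (⟨-, lx, ly, hk, hgl, -⟩ | hs)
                · obtain ⟨rfl, rfl⟩ : a = lx ∧ b = ly := by simpa using hk
                  exact absurd hgl hg
                · exact hs
        · cases v <;> simp [pvMarks]

-- the bridge: a grid cell is adjacent (A's sense) iff some board entry marks it (B's sense)
theorem pv_adj_iff_marks (board : List (List Int × Option String))
    (hnd : (board.map Prod.fst).Nodup) (x y : Int) (hg : pvGrid x y) :
    pvAdjA board x y ↔ ∃ kv ∈ board, pvMarks kv (x, y) := by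
  constructor
  · rintro ⟨dy, hdy, dx, hdx, hgrid, hlk⟩
    obtain ⟨v, hq, hv⟩ : ∃ v, (PySem.Dict.mk board).get? [x + dx, y + dy] = some v ∧ v ≠ none := by
      rcases hq : (PySem.Dict.mk board).get? [x + dx, y + dy] with _ | v
      · exact absurd (by simp [pvLk, PySem.Dict.getD_eq_get?_getD, hq]) hlk
      · refine ⟨v, rfl, ?_⟩
        rintro rfl
        exact hlk (by simp [pvLk, PySem.Dict.getD_eq_get?_getD, hq])
    have hmem : ([x + dx, y + dy], v) ∈ board :=
      PySem.Dict.mem_items_of_get?_eq_some _ hq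
    refine ⟨([x + dx, y + dy], v), hmem, hv, x + dx, y + dy, rfl, hgrid, y, ?_, x, ?_, hg, rfl⟩
    · have : dy = -1 ∨ dy = 0 ∨ dy = 1 := by simpa using hdy
      simp only [List.mem_cons, List.not_mem_nil, or_false]
      omega
    · have : dx = -1 ∨ dx = 0 ∨ dx = 1 := by simpa using hdx
      simp only [List.mem_cons, List.not_mem_nil, or_false]
      omega
  · rintro ⟨⟨k, v⟩, hmem, hv, lx, ly, rfl, hgl, ny, hny, nx, hnx, hgn, hc⟩
    rw [Prod.ext_iff] at hc
    obtain ⟨hx, hy2⟩ := hc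
    simp only [List.mem_cons, List.not_mem_nil, or_false] at hny hnx
    have hget : (PySem.Dict.mk board).get? [lx, ly] = some v := by
      apply PySem.Dict.get?_of_mem_items <;> simpa
    have e1 : x + (lx - x) = lx := by ring
    have e2 : y + (ly - y) = ly := by ring
    refine ⟨ly - y, ?_, lx - x, ?_, ?_, ?_⟩
    · simp only [List.mem_cons, List.not_mem_nil, or_false]
      omega
    · simp only [List.mem_cons, List.not_mem_nil, or_false]
      omega
    · rw [e1, e2]
      exact hgl
    · rw [e1, e2]
      simpa [pvLk, PySem.Dict.getD_eq_get?_getD, hget] using hv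

-- fold over the grid cells = the nested loops over rows and cols
theorem pv_foldl_cells {σ : Type} (F : σ → (Int × Int) → σ) (init : σ) :
    pvCells.foldl F init =
      (PySem.List.pyRange 0 10 1).foldl (fun d y =>
        (PySem.List.pyRange 0 15 1).foldl (fun d x => F d (x, y)) d) init := by
  simp only [pvCells, List.flatMap_def, List.foldl_flatten, List.foldl_map]

set_option maxRecDepth 100000 in
set_option maxHeartbeats 1000000 in
theorem pv_cells_nodup_keys : (pvCells.map (fun c => ([c.1, c.2] : List Int))).Nodup := by decide

theorem pv_filterMap_ite {α β : Type} (P : α → Prop) [DecidablePred P] (f : α → β)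
    (l : List α) :
    l.filterMap (fun x => if P x then some (f x) else none)
      = (l.filter (fun x => decide (P x))).map f := by
  induction l with
  | nil => rfl
  | cons a t ih => by_cases h : P a <;> simp [h, ih]

theorem pv_flatMap_congr {α β : Type} (l : List α) (f g : α → List β)
    (h : ∀ a ∈ l, f a = g a) : l.flatMap f = l.flatMap g := by
  induction l with
  | nil => rfl
  | cons a t ih =>
    simp only [List.flatMap_cons, h a (List.mem_cons_self), ih fun b hb => h b (List.mem_cons_of_mem a hb)]

theorem pv_filter_flatMap {α β : Type} (l : List α) (g : α → List β) (p : β → Bool) :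
    (l.flatMap g).filter p = l.flatMap (fun a => (g a).filter p) := by
  induction l with
  | nil => rfl
  | cons a t ih => simp [List.flatMap_cons, List.filter_append, ih]

-- A in filter/map form
theorem pv_A_eq (board : List (List Int × Option String)) :
    remove_impossible board
      = (pvCells.filter (fun c => decide (pvAdjA board c.1 c.2))).map
          (fun c => (([c.1, c.2] : List Int), PySem.Dict.getD (PySem.Dict.mk board) [c.1, c.2] none)) := by
  unfold remove_impossible
  simp only [pv_adjA_eq]
  rw [← pv_foldl_cells (fun d (c : Int × Int) =>
        if decide (pvAdjA board c.1 c.2) then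
          PySem.Dict.insert d [c.1, c.2] (PySem.Dict.getD (PySem.Dict.mk board) [c.1, c.2] none)
        else d) PySem.Dict.empty]
  rw [← List.foldl_filter]
  rw [PySem.Dict.items_foldl_insert_fresh]
  · rfl
  · intro a _
    simp [PySem.Dict.contains_empty]
  · exact List.Nodup.sublist (List.Sublist.map _ List.filter_sublist) pv_cells_nodup_keys

-- B in flatMap/filter/map form
theorem pv_B_eq (board : List (List Int × Option String)) :
    remove_impossible_alt board
      = (PySem.List.pyRange 0 10 1).flatMap (fun y =>
          ((PySem.List.pyRange 0 15 1).filter (fun x =>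
            decide ((x, y) ∈ board.foldl (fun s kv =>
              match kv with
              | ([x, y], some _) =>
                if 0 ≤ x ∧ x < 15 ∧ 0 ≤ y ∧ y < 10 then
                  ([y - 1, y, y + 1] : List Int).foldl (fun s ny =>
                    ([x - 1, x, x + 1] : List Int).foldl (fun s nx =>
                      if 0 ≤ nx ∧ nx < 15 ∧ 0 ≤ ny ∧ ny < 10 then PySem.Set.add s (nx, ny)
                      else s) s) s
                else s
              | _ => s) PySem.Set.empty))).map
            (fun x => (([x, y] : List Int), PySem.Dict.getD (PySem.Dict.mk board) [x, y] none))) := by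
  unfold remove_impossible_alt
  simp only [pv_filterMap_ite]

-- final assembly
theorem pv_final (board : List (List Int × Option String))
    (hnd : (board.map Prod.fst).Nodup) :
    (pvCells.filter (fun c => decide (pvAdjA board c.1 c.2))).map
        (fun c => (([c.1, c.2] : List Int), PySem.Dict.getD (PySem.Dict.mk board) [c.1, c.2] none))
      = (PySem.List.pyRange 0 10 1).flatMap (fun y =>
          ((PySem.List.pyRange 0 15 1).filter (fun x =>
            decide ((x, y) ∈ board.foldl (fun s kv =>
              match kv with
              | ([x, y], some _) =>
                if 0 ≤ x ∧ x < 15 ∧ 0 ≤ y ∧ y < 10 then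
                  ([y - 1, y, y + 1] : List Int).foldl (fun s ny =>
                    ([x - 1, x, x + 1] : List Int).foldl (fun s nx =>
                      if 0 ≤ nx ∧ nx < 15 ∧ 0 ≤ ny ∧ ny < 10 then PySem.Set.add s (nx, ny)
                      else s) s) s
                else s
              | _ => s) PySem.Set.empty))).map
            (fun x => (([x, y] : List Int), PySem.Dict.getD (PySem.Dict.mk board) [x, y] none))) := by
  simp only [pvCells]
  rw [pv_filter_flatMap, List.map_flatMap]
  apply pv_flatMap_congr
  intro y hy
  have hy' : 0 ≤ y ∧ y < 10 := by simpa using (PySem.List.mem_pyRange_one.mp hy)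
  rw [List.filter_map, List.map_map]
  refine congrArg₂ List.map (by funext x; rfl) ?_
  apply List.filter_congr
  intro x hx
  have hx' : 0 ≤ x ∧ x < 15 := by simpa using (PySem.List.mem_pyRange_one.mp hx)
  simp only [Function.comp]
  apply decide_eq_decide.mpr
  exact (pv_adj_iff_marks board hnd x y ⟨hx'.1, hx'.2, hy'.1, hy'.2⟩).trans
    (pv_mem_active board (x, y)).symm

-- ===== VERDICT (by name: the statement is the Claim_ definition above) =====
theorem remove_impossible_spec : Claim_equal_remove_impossible := by
  intro board _ hpre
  show remove_impossible board = remove_impossible_alt board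
  rw [pv_A_eq board, pv_B_eq board]
  exact pv_final board hpre
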